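-- pv_equiv track=rewrite | github.com/Filianda/Domino | Domino.py | generate_snake
-- ===== SOURCE A (Python) =====
-- def generate_snake(domino_snake):
--     snake = ""
--     for piece_index in range(len(domino_snake)):
--         if len(domino_snake) > 6:
--             if piece_index < 3 or piece_index >= len(domino_snake) - 3:
--                 snake += str(domino_snake[piece_index])
--             elif piece_index == 3:
--                 snake += '...'
--         else:
--             snake +=  str(domino_snake[piece_index])
--     return snake
-- ===== SOURCE B (Python) =====
-- def generate_snake(domino_snake):
--     if len(domino_snake) > 6:
--         return (''.join(map(str, domino_snake[:3]))
--                 + '...'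
--                 + ''.join(map(str, domino_snake[-3:])))
--     return ''.join(map(str, domino_snake))
-- ===== Notes on version B (the rewrite author's own statement) =====
-- stated objective: simpler
-- what changed: Hoisted the length>6 test out of the loop and replaced the index loop with per-element branching by slice+join: the long case concatenates the first-3 and last-3 slices around '...', never visiting the middle.
import Mathlib
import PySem

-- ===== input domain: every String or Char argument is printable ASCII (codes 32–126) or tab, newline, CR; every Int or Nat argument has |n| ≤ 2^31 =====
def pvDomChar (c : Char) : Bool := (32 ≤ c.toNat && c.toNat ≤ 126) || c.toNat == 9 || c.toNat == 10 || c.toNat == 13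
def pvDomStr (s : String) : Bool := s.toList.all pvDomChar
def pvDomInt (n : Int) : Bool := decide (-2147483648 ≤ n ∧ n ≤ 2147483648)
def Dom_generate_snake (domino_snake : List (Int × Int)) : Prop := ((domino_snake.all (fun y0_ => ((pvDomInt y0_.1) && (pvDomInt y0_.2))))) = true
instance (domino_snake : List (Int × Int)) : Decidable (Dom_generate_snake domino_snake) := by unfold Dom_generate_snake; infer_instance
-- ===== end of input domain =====

-- B hoists the `len > 6` test out of the loop and builds the long form from the
-- first-3 / last-3 slices around '...' (objective: simpler; same return value).

-- str((a, b)) in Python prints "(a, b)"; exact over List Char.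
def pieceChars (p : Int × Int) : List Char :=
  '(' :: PySem.Int.toChars p.1 ++ ',' :: ' ' :: PySem.Int.toChars p.2 ++ [')']

-- ===== PORT A =====
-- loop over range(len), accumulating the string as a List Char; the pyGetD
-- default (0, 0) is never used (the index comes from range(len)).
def generate_snake (domino_snake : List (Int × Int)) : String :=
  String.ofList <|
    (PySem.List.pyRange 0 (PySem.List.len domino_snake) 1).foldl
      (fun snake piece_index =>
        if (PySem.List.len domino_snake) > 6 then
          if piece_index < 3 ∨ piece_index ≥ (PySem.List.len domino_snake) - 3 then
            snake ++ pieceChars (PySem.List.pyGetD domino_snake piece_index (0, 0))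
          else if piece_index = 3 then
            snake ++ ('.' :: '.' :: '.' :: [])
          else snake
        else snake ++ pieceChars (PySem.List.pyGetD domino_snake piece_index (0, 0)))
      []

-- ===== PORT B =====
def generate_snake_alt (domino_snake : List (Int × Int)) : String :=
  if (PySem.List.len domino_snake) > 6 then
    String.ofList <|
      (PySem.List.slice domino_snake none (some 3)).flatMap pieceChars
        ++ ('.' :: '.' :: '.' :: [])
        ++ (PySem.List.slice domino_snake (some (-3)) none).flatMap pieceChars
  else
    String.ofList (domino_snake.flatMap pieceChars)

-- ===== PRECONDITION & SPEC =====
def Spec_generate_snake (domino_snake : List (Int × Int)) (out : String) : Prop := out = generate_snake_alt domino_snake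
instance (domino_snake : List (Int × Int)) (out : String) : Decidable (Spec_generate_snake domino_snake out) := by unfold Spec_generate_snake; infer_instance

-- ===== CLAIM (what is proved, stated in full; the proofs are below) =====
def Claim_equal_generate_snake : Prop := ∀ (domino_snake : List (Int × Int)), Dom_generate_snake domino_snake → Spec_generate_snake domino_snake (generate_snake domino_snake)

-- ===== LEMMAS AND PROOFS =====

-- the body of A's fold, as a pure per-index contribution
def gBody (l : List (Int × Int)) (i : Int) : List Char :=
  if (PySem.List.len l) > 6 then
    if i < 3 ∨ i ≥ (PySem.List.len l) - 3 then
      pieceChars (PySem.List.pyGetD l i (0, 0))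
    else if i = 3 then ('.' :: '.' :: '.' :: [])
    else []
  else pieceChars (PySem.List.pyGetD l i (0, 0))

theorem flatMap_congr_mem {α β : Type} {l : List α} {f g : α → List β}
    (h : ∀ x ∈ l, f x = g x) : l.flatMap f = l.flatMap g := by
  induction l with
  | nil => rfl
  | cons x xs ih =>
    rw [List.flatMap_cons, List.flatMap_cons, h x (by simp),
      ih (fun y hy => h y (by simp [hy]))]

theorem foldA_eq_flatMap (l : List (Int × Int)) :
    generate_snake l
      = String.ofList ((PySem.List.pyRange 0 (PySem.List.len l) 1).flatMap (gBody l)) := by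
  unfold generate_snake
  have hb : (fun (snake : List Char) (i : Int) =>
        if (PySem.List.len l) > 6 then
          if i < 3 ∨ i ≥ (PySem.List.len l) - 3 then
            snake ++ pieceChars (PySem.List.pyGetD l i (0, 0))
          else if i = 3 then snake ++ ('.' :: '.' :: '.' :: [])
          else snake
        else snake ++ pieceChars (PySem.List.pyGetD l i (0, 0)))
      = fun snake i => snake ++ gBody l i := by
    funext snake i
    unfold gBody
    split_ifs <;> simp
  rw [hb, PySem.List.foldl_append_eq_flatMap]
  simp

-- flatMap of the getter over range a..a+m is the corresponding segment of l
theorem flatMap_get_seg (l : List (Int × Int)) (f : (Int × Int) → List Char) :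
    ∀ (m a : Nat), a + m ≤ l.length →
      (PySem.List.pyRange (a : Int) ((a : Int) + (m : Int)) 1).flatMap
          (fun i => f (PySem.List.pyGetD l i (0, 0)))
        = ((l.drop a).take m).flatMap f := by
  intro m
  induction m with
  | zero =>
    intro a _
    simp [PySem.List.pyRange]
  | succ m ih =>
    intro a h
    have ha : a < l.length := by omega
    rw [PySem.List.pyRange_one_cons (by push_cast; omega)]
    have hrec := ih (a + 1) (by omega)
    have harg : ((a : Int) + ((m : Nat) + 1 : Nat) : Int) = ((a + 1 : Nat) : Int) + (m : Int) := by
      push_cast; omega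
    have hcast : ((a : Int) + 1) = ((a + 1 : Nat) : Int) := by push_cast; omega
    rw [List.flatMap_cons, harg, hcast, hrec,
      List.drop_eq_getElem_cons ha, List.take_succ_cons, List.flatMap_cons,
      PySem.List.pyGetD_natCast, List.getD_eq_getElem l _ ha]

theorem flatMap_gBody_mid (l : List (Int × Int)) (h : (PySem.List.len l) > 6) :
    (PySem.List.pyRange 4 ((PySem.List.len l) - 3) 1).flatMap (gBody l) = [] := by
  rw [List.flatMap_eq_nil_iff]
  intro i hi
  rw [PySem.List.mem_pyRange_one] at hi
  unfold gBody
  rw [if_pos h, if_neg (by omega), if_neg (by omega)]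

theorem len_eq_cast (l : List (Int × Int)) : PySem.List.len l = (l.length : Int) := by
  simp [PySem.List.len]

-- ===== VERDICT (by name: the statement is the Claim_ definition above) =====
theorem generate_snake_spec : Claim_equal_generate_snake := by
  intro l _
  unfold Spec_generate_snake generate_snake_alt
  rw [foldA_eq_flatMap]
  by_cases h : (PySem.List.len l) > 6
  · rw [if_pos h]
    have hlen := len_eq_cast l
    have h7 : 7 ≤ l.length := by omega
    rw [PySem.List.pyRange_one_append 0 3 (PySem.List.len l) (by omega) (by omega),
        PySem.List.pyRange_one_append 3 4 (PySem.List.len l) (by omega) (by omega),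
        PySem.List.pyRange_one_append 4 ((PySem.List.len l) - 3) (PySem.List.len l)
          (by omega) (by omega),
        List.flatMap_append, List.flatMap_append, List.flatMap_append,
        flatMap_gBody_mid l h]
    have hfirst : (PySem.List.pyRange 0 3 1).flatMap (gBody l)
        = (l.take 3).flatMap pieceChars := by
      rw [flatMap_congr_mem (g := fun i => pieceChars (PySem.List.pyGetD l i (0, 0)))
            (by intro i hi
                rw [PySem.List.mem_pyRange_one] at hi
                unfold gBody
                rw [if_pos h, if_pos (by omega)])]
      have := flatMap_get_seg l pieceChars 3 0 (by omega)
      simpa using this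
    have hdot : (PySem.List.pyRange 3 4 1).flatMap (gBody l)
        = ('.' :: '.' :: '.' :: []) := by
      have h34 : PySem.List.pyRange 3 4 1 = [3] := by decide
      rw [h34, List.flatMap_cons, List.flatMap_nil]
      unfold gBody
      rw [if_pos h, if_neg (by omega), if_pos rfl, List.append_nil]
    have hlast : (PySem.List.pyRange ((PySem.List.len l) - 3) (PySem.List.len l) 1).flatMap (gBody l)
        = (l.drop (l.length - 3)).flatMap pieceChars := by
      rw [flatMap_congr_mem (g := fun i => pieceChars (PySem.List.pyGetD l i (0, 0)))
            (by intro i hi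
                rw [PySem.List.mem_pyRange_one] at hi
                unfold gBody
                rw [if_pos h, if_pos (by omega)])]
      have hc1 : (PySem.List.len l) - 3 = ((l.length - 3 : Nat) : Int) := by
        rw [hlen]; omega
      have hc2 : (PySem.List.len l) = ((l.length - 3 : Nat) : Int) + ((3 : Nat) : Int) := by
        rw [hlen]; omega
      rw [hc1, hc2, flatMap_get_seg l pieceChars 3 (l.length - 3) (by omega)]
      rw [List.take_of_length_le (by simp; omega)]
    rw [hfirst, hdot, hlast,
      PySem.List.slice_to l (by norm_num), PySem.List.slice_from_neg_ofNat l 3 (by omega)]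
    simp
  · rw [if_neg h]
    rw [flatMap_congr_mem (g := fun i => pieceChars (PySem.List.pyGetD l i (0, 0)))
          (by intro i _; unfold gBody; rw [if_neg h])]
    have hseg := flatMap_get_seg l pieceChars l.length 0 (by omega)
    push_cast at hseg
    simp only [zero_add, List.drop_zero, List.take_length] at hseg
    rw [len_eq_cast, hseg]
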